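-- pv_equiv track=rewrite | github.com/g-s01/data-programming-btp | gautam-results-and-analysis/raw-to-fine-direct/through-lfs/context-window-one/lfs_for_raw_sentence_gpt.py | label_sentence_Product_Vehicle
-- ===== SOURCE A (Python) =====
-- ABSTAIN = -1
--
-- Product_Vehicle = 11
--
-- def label_sentence_Product_Vehicle(tokens):
--     """
--     Labels each token in a sentence as Product_Vehicle if it indicates a type of vehicle or transportation product.
--     Returns ABSTAIN for tokens that do not match the category.
--
--     Args:
--     tokens: list of str - A list of words representing a sentence.
--
--     Returns:
--     list of str - A list of labels for each token.
--     """
--     # Common vehicle-related indicators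
--     vehicle_indicators = {
--         'car', 'train', 'locomotive', 'ship', 'boat', 'sailing', 'vessel', 'aircraft', 'plane', 'helicopter',
--         'submarine', 'yacht', 'whaler', 'junk', 'tram', 'bus', 'bicycle', 'motorcycle', 'scooter', 'sedan',
--         'coupe', 'convertible', 'truck', 'lorry', 'jeep', 'tractor', 'ambulance', 'van', 'wagon', 'cab',
--         'd-type', 'express', 'carrier', 'steamer'
--     }
--     product_context = {
--         'driving', 'built', 'operating', 'commissioned', 'sailed', 'launched', 'model', 'fitted', 'equipped',
--         'vehicle', 'transport', 'engine', 'design', 'expedition', 'route', 'journey', 'trip'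
--     }
--
--     labels = []
--
--     for i, token in enumerate(tokens):
--         token_lower = token.lower()
--
--         # Check if the token or surrounding tokens suggest a vehicle
--         if (
--             token_lower in vehicle_indicators and (  # The token itself indicates a vehicle
--             (i > 0 and tokens[i - 1].lower() in vehicle_indicators) or  # Preceded by a vehicle indicator
--             (i < len(tokens) - 1 and tokens[i + 1].lower() in vehicle_indicators) or  # Followed by a vehicle indicator
--             (i > 0 and tokens[i - 1].lower() in product_context) or  # Preceded by a vehicle context keyword
--             (i < len(tokens) - 1 and tokens[i + 1].lower() in product_context))  # Followed by a vehicle context keyword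
--         ):
--             labels.append(Product_Vehicle)
--         else:
--             labels.append(ABSTAIN)  # Default to 'O' if no match is found
--
--     return labels
-- ===== SOURCE B (Python) =====
-- ABSTAIN = -1
--
-- Product_Vehicle = 11
--
-- _VEHICLE = {
--     'car', 'train', 'locomotive', 'ship', 'boat', 'sailing', 'vessel', 'aircraft', 'plane', 'helicopter',
--     'submarine', 'yacht', 'whaler', 'junk', 'tram', 'bus', 'bicycle', 'motorcycle', 'scooter', 'sedan',
--     'coupe', 'convertible', 'truck', 'lorry', 'jeep', 'tractor', 'ambulance', 'van', 'wagon', 'cab',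
--     'd-type', 'express', 'carrier', 'steamer'
-- }
-- _CONTEXT = {
--     'driving', 'built', 'operating', 'commissioned', 'sailed', 'launched', 'model', 'fitted', 'equipped',
--     'vehicle', 'transport', 'engine', 'design', 'expedition', 'route', 'journey', 'trip'
-- }
--
-- def label_sentence_Product_Vehicle(tokens):
--     # Streaming state machine with delayed emission: each token's label is emitted
--     # one step late, once its right neighbor has been seen; no indexing, no lookahead.
--     labels = []
--     pend = None        # (is_vehicle, left_neighbor_interesting) of the previous token
--     prev_int = False   # whether the previous token is "interesting" (vehicle or context)
--     for t in tokens: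
--         low = t.lower()
--         v = low in _VEHICLE
--         inter = v or low in _CONTEXT
--         if pend is not None:
--             pv, pl = pend
--             labels.append(Product_Vehicle if pv and (pl or inter) else ABSTAIN)
--         pend = (v, prev_int)
--         prev_int = inter
--     if pend is not None:
--         pv, pl = pend
--         labels.append(Product_Vehicle if pv and pl else ABSTAIN)
--     return labels
-- ===== Notes on version B (the rewrite author's own statement) =====
-- stated objective: alternative
-- what changed: B replaces A's indexed loop with four guarded random-access neighbor lookups by a streaming state machine with delayed emission: one forward pass carrying (pending token's vehicle flag, its left-neighbor interest, previous interest) that emits each label one step late when the right neighbor arrives, plus a final flush - no indexing or lookahead at all.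
import Mathlib
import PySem

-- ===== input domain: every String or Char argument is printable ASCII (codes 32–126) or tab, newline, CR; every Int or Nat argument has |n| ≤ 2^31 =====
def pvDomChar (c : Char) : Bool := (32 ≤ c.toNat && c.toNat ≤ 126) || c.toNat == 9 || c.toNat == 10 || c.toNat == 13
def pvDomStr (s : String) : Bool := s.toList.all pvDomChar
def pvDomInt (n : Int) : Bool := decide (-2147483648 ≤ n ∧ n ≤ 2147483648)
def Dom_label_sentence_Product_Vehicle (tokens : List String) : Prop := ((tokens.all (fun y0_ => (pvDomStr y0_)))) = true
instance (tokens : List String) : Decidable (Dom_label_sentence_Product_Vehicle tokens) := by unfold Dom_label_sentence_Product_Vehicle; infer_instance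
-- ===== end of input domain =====

-- B replaces A's indexed loop with guarded neighbor lookups by a streaming state machine
-- with delayed emission (each label emitted once the right neighbor is seen, final flush)
-- (objective: alternative decomposition; same asymptotic cost).

-- ===== PORT A =====
def pvVehicleIndicators : PySem.Set String := PySem.Set.ofList
  ["car", "train", "locomotive", "ship", "boat", "sailing", "vessel", "aircraft", "plane", "helicopter",
   "submarine", "yacht", "whaler", "junk", "tram", "bus", "bicycle", "motorcycle", "scooter", "sedan",
   "coupe", "convertible", "truck", "lorry", "jeep", "tractor", "ambulance", "van", "wagon", "cab",
   "d-type", "express", "carrier", "steamer"]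

def pvProductContext : PySem.Set String := PySem.Set.ofList
  ["driving", "built", "operating", "commissioned", "sailed", "launched", "model", "fitted", "equipped",
   "vehicle", "transport", "engine", "design", "expedition", "route", "journey", "trip"]

def label_sentence_Product_Vehicle (tokens : List String) : List Int :=
  (PySem.List.enumerate tokens).foldl (fun labels p =>
    let i : Int := p.1
    let token_lower := PySem.Str.lower p.2
    if pvVehicleIndicators.contains token_lower &&
       ((decide (i > 0) && pvVehicleIndicators.contains (PySem.Str.lower (PySem.List.pyGetD tokens (i - 1) ""))) ||
        (decide (i < (tokens.length : Int) - 1) && pvVehicleIndicators.contains (PySem.Str.lower (PySem.List.pyGetD tokens (i + 1) ""))) ||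
        (decide (i > 0) && pvProductContext.contains (PySem.Str.lower (PySem.List.pyGetD tokens (i - 1) ""))) ||
        (decide (i < (tokens.length : Int) - 1) && pvProductContext.contains (PySem.Str.lower (PySem.List.pyGetD tokens (i + 1) ""))))
    then labels ++ [11]
    else labels ++ [-1]) []

-- ===== PORT B =====
-- state of the streaming pass: (labels, pend = (is_vehicle, left_interesting) of previous token, prev_int)
def pvStepB (st : List Int × Option (Bool × Bool) × Bool) (t : String) :
    List Int × Option (Bool × Bool) × Bool :=
  let low := PySem.Str.lower t
  let v := pvVehicleIndicators.contains low
  let inter := v || pvProductContext.contains low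
  let labels :=
    match st.2.1 with
    | none => st.1
    | some (pv, pl) => st.1 ++ [if pv && (pl || inter) then (11 : Int) else -1]
  (labels, some (v, st.2.2), inter)

def label_sentence_Product_Vehicle_alt (tokens : List String) : List Int :=
  let st := tokens.foldl pvStepB ([], none, false)
  match st.2.1 with
  | none => st.1
  | some (pv, pl) => st.1 ++ [if pv && pl then (11 : Int) else -1]

-- ===== PRECONDITION & SPEC =====
def Spec_label_sentence_Product_Vehicle (tokens : List String) (out : List Int) : Prop := out = label_sentence_Product_Vehicle_alt tokens
instance (tokens : List String) (out : List Int) : Decidable (Spec_label_sentence_Product_Vehicle tokens out) := by unfold Spec_label_sentence_Product_Vehicle; infer_instance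

-- ===== CLAIM (what is proved, stated in full; the proofs are below) =====
def Claim_equal_label_sentence_Product_Vehicle : Prop := ∀ (tokens : List String), Dom_label_sentence_Product_Vehicle tokens → Spec_label_sentence_Product_Vehicle tokens (label_sentence_Product_Vehicle tokens)

-- ===== LEMMAS AND PROOFS =====

def pvIB (w : String) : Bool :=
  pvVehicleIndicators.contains (PySem.Str.lower w) || pvProductContext.contains (PySem.Str.lower w)

def pvVB (w : String) : Bool := pvVehicleIndicators.contains (PySem.Str.lower w)

def pvHInt : List String → Bool
  | [] => false
  | u :: _ => pvIB u

-- recursive one-token-lookahead reference for B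
def pvRecAux : Bool → List String → List Int
  | _, [] => []
  | p, t :: ts => (if pvVB t && (p || pvHInt ts) then (11 : Int) else -1) :: pvRecAux (pvIB t) ts

-- pointwise condition used to characterise both programs
def pvCond (tokens : List String) (k : Nat) : Bool :=
  pvVehicleIndicators.contains (PySem.Str.lower (tokens.getD k "")) &&
  ((decide (0 < k) &&
      (pvVehicleIndicators.contains (PySem.Str.lower (tokens.getD (k - 1) "")) ||
       pvProductContext.contains (PySem.Str.lower (tokens.getD (k - 1) "")))) ||
   (decide (k + 1 < tokens.length) &&
      (pvVehicleIndicators.contains (PySem.Str.lower (tokens.getD (k + 1) "")) ||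
       pvProductContext.contains (PySem.Str.lower (tokens.getD (k + 1) "")))))

theorem pv_bool_combine (p q va vb ca cb : Bool) :
    (p && va || q && vb || p && ca || q && cb) = (p && (va || ca) || q && (vb || cb)) := by
  cases p <;> cases q <;> cases va <;> cases vb <;> cases ca <;> cases cb <;> rfl

def pvBodyA (tokens : List String) (p : Int × String) : Int :=
  if pvVehicleIndicators.contains (PySem.Str.lower p.2) &&
     ((decide (p.1 > 0) && pvVehicleIndicators.contains (PySem.Str.lower (PySem.List.pyGetD tokens (p.1 - 1) ""))) ||
      (decide (p.1 < (tokens.length : Int) - 1) && pvVehicleIndicators.contains (PySem.Str.lower (PySem.List.pyGetD tokens (p.1 + 1) ""))) ||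
      (decide (p.1 > 0) && pvProductContext.contains (PySem.Str.lower (PySem.List.pyGetD tokens (p.1 - 1) ""))) ||
      (decide (p.1 < (tokens.length : Int) - 1) && pvProductContext.contains (PySem.Str.lower (PySem.List.pyGetD tokens (p.1 + 1) ""))))
  then 11 else -1

theorem pvA_eq_map (tokens : List String) :
    label_sentence_Product_Vehicle tokens =
      (PySem.List.enumerate tokens).map (pvBodyA tokens) := by
  unfold label_sentence_Product_Vehicle
  have h1 : ∀ (l : List (Int × String)) (labels : List Int),
      l.foldl (fun labels p =>
        let i : Int := p.1
        let token_lower := PySem.Str.lower p.2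
        if pvVehicleIndicators.contains token_lower &&
           ((decide (i > 0) && pvVehicleIndicators.contains (PySem.Str.lower (PySem.List.pyGetD tokens (i - 1) ""))) ||
            (decide (i < (tokens.length : Int) - 1) && pvVehicleIndicators.contains (PySem.Str.lower (PySem.List.pyGetD tokens (i + 1) ""))) ||
            (decide (i > 0) && pvProductContext.contains (PySem.Str.lower (PySem.List.pyGetD tokens (i - 1) ""))) ||
            (decide (i < (tokens.length : Int) - 1) && pvProductContext.contains (PySem.Str.lower (PySem.List.pyGetD tokens (i + 1) ""))))
        then labels ++ [11]
        else labels ++ [-1]) labels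
      = labels ++ l.map (pvBodyA tokens) := by
    intro l
    induction l with
    | nil => simp
    | cons x xs ih =>
      intro labels
      simp only [List.foldl_cons, List.map_cons]
      rw [ih]
      unfold pvBodyA
      split <;> simp_all
  rw [h1, List.nil_append]

theorem pvBodyA_eq (tokens : List String) (k : Nat) (hk : k < tokens.length) :
    pvBodyA tokens ((k : Int), tokens[k]) = if pvCond tokens k then (11 : Int) else -1 := by
  unfold pvBodyA
  dsimp only
  congr 1
  rw [pv_bool_combine]
  unfold pvCond
  have hget : tokens.getD k "" = tokens[k] := by
    simp [List.getD, List.getElem?_eq_getElem hk]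
  rw [hget]
  congr 1
  have hp : decide (((k : Int)) > 0) = decide (0 < k) := by simp
  have hq : decide (((k : Int)) < (tokens.length : Int) - 1) = decide (k + 1 < tokens.length) := by
    simp only [decide_eq_decide]; omega
  rw [hp, hq]
  by_cases h0 : 0 < k <;> by_cases h1 : k + 1 < tokens.length
  · rw [show ((k : Int)) - 1 = ((k - 1 : Nat) : Int) from by omega,
        show ((k : Int)) + 1 = ((k + 1 : Nat) : Int) from by omega,
        PySem.List.pyGetD_natCast, PySem.List.pyGetD_natCast]
  · rw [show ((k : Int)) - 1 = ((k - 1 : Nat) : Int) from by omega, PySem.List.pyGetD_natCast]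
    simp [h1]
  · rw [show ((k : Int)) + 1 = ((k + 1 : Nat) : Int) from by omega, PySem.List.pyGetD_natCast]
    simp [h0]
  · simp [h0, h1]

-- the fold-with-flush equals the recursive lookahead reference
theorem pvB_fold (l : List String) :
    ∀ (acc : List Int) (pv pl pi : Bool),
      (match (l.foldl pvStepB (acc, some (pv, pl), pi)).2.1 with
       | none => (l.foldl pvStepB (acc, some (pv, pl), pi)).1
       | some (qv, ql) => (l.foldl pvStepB (acc, some (pv, pl), pi)).1 ++ [if qv && ql then (11 : Int) else -1])
      = acc ++ (if pv && (pl || pvHInt l) then (11 : Int) else -1) :: pvRecAux pi l := by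
  induction l with
  | nil => intro acc pv pl pi; simp [pvRecAux, pvHInt]
  | cons t ts ih =>
    intro acc pv pl pi
    simp only [List.foldl_cons]
    have hstep : pvStepB (acc, some (pv, pl), pi) t =
        (acc ++ [if pv && (pl || pvIB t) then (11 : Int) else -1], some (pvVB t, pi), pvIB t) := by
      simp [pvStepB, pvVB, pvIB]
    rw [hstep, ih]
    simp [pvRecAux, pvHInt, List.append_assoc]

theorem pvB_eq_rec (tokens : List String) :
    label_sentence_Product_Vehicle_alt tokens = pvRecAux false tokens := by
  unfold label_sentence_Product_Vehicle_alt
  cases tokens with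
  | nil => rfl
  | cons t ts =>
    simp only [List.foldl_cons]
    have hstep : pvStepB ([], none, false) t = ([], some (pvVB t, false), pvIB t) := by
      simp [pvStepB, pvVB, pvIB]
    rw [hstep]
    have := pvB_fold ts [] (pvVB t) false (pvIB t)
    simp only [List.nil_append] at this
    rw [this]
    simp [pvRecAux]

theorem pvRecAux_length (l : List String) : ∀ p, (pvRecAux p l).length = l.length := by
  induction l with
  | nil => intro p; rfl
  | cons t ts ih => intro p; simp [pvRecAux, ih]

theorem pvRecAux_getElem (l : List String) :
    ∀ (p : Bool) (k : Nat) (hk : k < l.length) (_hk' : k < (pvRecAux p l).length),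
      (pvRecAux p l)[k] =
        if pvVB (l.getD k "") &&
           ((if k = 0 then p else pvIB (l.getD (k - 1) "")) ||
            (decide (k + 1 < l.length) && pvIB (l.getD (k + 1) "")))
        then (11 : Int) else -1 := by
  induction l with
  | nil => intro p k hk _; simp at hk
  | cons t ts ih =>
    intro p k hk hk'
    cases k with
    | zero =>
      simp only [pvRecAux, List.getElem_cons_zero, List.getD_cons_zero, List.getD_cons_succ]
      cases ts with
      | nil => simp [pvHInt]
      | cons u us => simp [pvHInt]
    | succ m =>
      simp only [pvRecAux, List.getElem_cons_succ]
      have hm : m < ts.length := by simpa using hk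
      have hm' : m < (pvRecAux (pvIB t) ts).length := by rw [pvRecAux_length]; exact hm
      rw [ih (pvIB t) m hm hm']
      cases m with
      | zero =>
        have h2 : (1 < ts.length) ↔ (2 ≤ ts.length) := by omega
        simp [h2]
      | succ j =>
        have h2 : (j + 1 + 1 + 1 < ts.length + 1) ↔ (j + 1 + 1 < ts.length) := by omega
        simp [h2]

theorem pvB_getElem (tokens : List String) (k : Nat) (hk : k < tokens.length)
    (_hk' : k < (label_sentence_Product_Vehicle_alt tokens).length) :
    (label_sentence_Product_Vehicle_alt tokens)[k] = if pvCond tokens k then (11 : Int) else -1 := by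
  have he : (label_sentence_Product_Vehicle_alt tokens)[k]
      = (pvRecAux false tokens)[k]'(by rw [pvRecAux_length]; exact hk) := by
    congr 1
    · exact pvB_eq_rec tokens
  rw [he, pvRecAux_getElem tokens false k hk (by rw [pvRecAux_length]; exact hk)]
  unfold pvCond pvVB pvIB
  cases k with
  | zero => simp
  | succ m => simp

-- ===== VERDICT (by name: the statement is the Claim_ definition above) =====
theorem label_sentence_Product_Vehicle_spec : Claim_equal_label_sentence_Product_Vehicle := by
  intro tokens _
  unfold Spec_label_sentence_Product_Vehicle
  rw [pvA_eq_map]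
  apply List.ext_getElem
  · rw [pvB_eq_rec, pvRecAux_length]; simp [PySem.List.length_enumerate]
  · intro k hk1 hk2
    have hk : k < tokens.length := by
      simpa [PySem.List.length_enumerate] using hk1
    rw [List.getElem_map, pvB_getElem tokens k hk hk2, PySem.List.getElem_enumerate]
    rw [show ((0 : Int) + (k : Int), tokens[k]) = ((k : Int), tokens[k]) from by norm_num]
    exact pvBodyA_eq tokens k hk
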